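-- pv_equiv track=rewrite | github.com/vitaliy-volkov/OpenConstructionERP | backend/app/modules/schedule/router.py | _parse_xer_tables
-- ===== SOURCE A (Python) =====
-- def _parse_xer_tables(content: str) -> dict[str, list[dict[str, str]]]:
--     """Parse Primavera P6 XER tab-delimited format into table dictionaries.
--
--     XER format uses:
--       %T <TABLE_NAME>     — start of a table
--       %F <col1> <col2>    — field (column) names
--       %R <val1> <val2>    — row values
--
--     Returns a dict mapping table name to a list of row dicts.
--     """
--     tables: dict[str, list[dict[str, str]]] = {}
--     current_table: str | None = None
--     current_fields: list[str] = []
--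
--     for raw_line in content.splitlines():
--         line = raw_line.rstrip("\r\n")
--         if not line or not line.startswith("%"):
--             continue
--         parts = line.split("\t")
--         directive = parts[0] if parts else ""
--
--         if directive == "%T" and len(parts) >= 2:
--             current_table = parts[1].strip()
--             current_fields = []
--             if current_table not in tables:
--                 tables[current_table] = []
--         elif directive == "%F" and current_table is not None:
--             current_fields = [p.strip() for p in parts[1:]]
--         elif directive == "%R" and current_table is not None and current_fields:
--             values = parts[1:]
--             row: dict[str, str] = {}
--             for i, field in enumerate(current_fields):
--                 row[field] = values[i].strip() if i < len(values) else ""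
--             tables[current_table].append(row)
--
--     return tables
-- ===== SOURCE B (Python) =====
-- def _parse_xer_tables(content: str) -> dict[str, list[dict[str, str]]]:
--     """Segment-first XER parser: split directive lines into %T-headed blocks,
--     then parse each block locally."""
--     # keep only directive lines, pre-split into tab-separated parts
--     lines = [ln.split("\t") for ln in content.splitlines() if ln.startswith("%")]
--     # block boundaries: every valid table-header line
--     starts = [i for i, p in enumerate(lines) if p[0] == "%T" and len(p) >= 2]
--     blocks = [lines[s:e] for s, e in zip(starts, starts[1:] + [len(lines)])]
--
--     tables: dict[str, list[dict[str, str]]] = {}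
--     for block in blocks:
--         name = block[0][1].strip()
--         rows = tables.setdefault(name, [])
--         fields: list[str] = []
--         for parts in block[1:]:
--             if parts[0] == "%F":
--                 fields = [p.strip() for p in parts[1:]]
--             elif parts[0] == "%R" and fields:
--                 vals = parts[1:]
--                 padded = [v.strip() for v in vals[:len(fields)]] + [""] * (len(fields) - len(vals))
--                 rows.append(dict(zip(fields, padded)))
--     return tables
-- ===== Notes on version B (the rewrite author's own statement) =====
-- stated objective: alternative
-- what changed: B replaces A's single cross-line state machine with a segment-first decomposition: it pre-filters and pre-splits the directive lines, slices them into %T-headed blocks via start indices, and parses each block locally (setdefault-merging duplicate table names, building each row by zipping fields with a padded value list).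
import Mathlib
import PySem

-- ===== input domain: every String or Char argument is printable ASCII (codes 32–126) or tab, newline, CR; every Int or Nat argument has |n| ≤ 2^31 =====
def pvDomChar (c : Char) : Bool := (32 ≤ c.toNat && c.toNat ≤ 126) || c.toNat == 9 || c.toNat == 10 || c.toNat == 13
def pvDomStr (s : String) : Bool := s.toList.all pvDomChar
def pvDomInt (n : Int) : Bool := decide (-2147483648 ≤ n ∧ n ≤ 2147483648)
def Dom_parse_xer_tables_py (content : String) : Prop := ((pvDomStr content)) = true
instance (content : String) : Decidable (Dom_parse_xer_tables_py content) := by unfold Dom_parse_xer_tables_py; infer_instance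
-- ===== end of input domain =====

-- B re-implements the XER parser segment-first (split directive lines into %T-headed blocks, then
-- parse each block locally) instead of A's single cross-line state machine; objective: alternative.

-- ===== PORT A =====
-- line.rstrip("\r\n") — right-strip of exactly the chars '\r','\n', ported by hand (exact)
def pyRstripCRLF (s : String) : String :=
  String.ofList ((s.toList.reverse.dropWhile (fun c => c == '\r' || c == '\n')).reverse)

-- values[i].strip() if i < len(values) else ""  (A's row-cell expression)
def pvValAt (vals : List String) (i : Int) : String :=
  if i < (vals.length : Int) then PySem.Str.strip ((PySem.List.pyGet? vals i).getD "") else ""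

-- body of A's loop once the skip-check has passed, acting on parts = line.split("\t");
-- state = (tables, current_table, current_fields)
def aBody (st : PySem.Dict String (List (PySem.Dict String String)) × Option String × List String)
    (parts : List String) :
    PySem.Dict String (List (PySem.Dict String String)) × Option String × List String :=
  let directive := parts.headD ""          -- parts[0] if parts else ""
  if directive == "%T" && decide (2 ≤ parts.length) then
    let t := PySem.Str.strip (parts.getD 1 "")   -- parts[1], in range by the guard
    (if st.1.contains t then st.1 else st.1.insert t [], some t, [])
  else if directive == "%F" && st.2.1.isSome then
    (st.1, st.2.1, (parts.drop 1).map PySem.Str.strip)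
  else if directive == "%R" && st.2.1.isSome && !st.2.2.isEmpty then
    let values := parts.drop 1
    let row := (PySem.List.enumerate st.2.2).foldl
      (fun r p => r.insert p.2 (pvValAt values p.1)) PySem.Dict.empty
    (st.1.modify (st.2.1.getD "") [] (· ++ [row]), st.2.1, st.2.2)
  else st

-- one iteration of A's `for raw_line in content.splitlines()` (the `continue` = return st unchanged)
def aStep (st : PySem.Dict String (List (PySem.Dict String String)) × Option String × List String)
    (raw_line : String) :
    PySem.Dict String (List (PySem.Dict String String)) × Option String × List String :=
  let line := pyRstripCRLF raw_line
  if line == "" || !(PySem.Str.startswith line "%") then st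
  else aBody st ((PySem.Str.split? line "\t").getD [])   -- sep ≠ "" ⇒ split? is always some

def parse_xer_tables_py (content : String) : List (String × List (List (String × String))) :=
  let fin := (PySem.Str.splitlines content).foldl aStep (PySem.Dict.empty, none, [])
  fin.1.items.map (fun kv => (kv.1, kv.2.map PySem.Dict.items))

-- ===== PORT B =====
def bHeader (p : List String) : Bool := p.headD "" == "%T" && decide (2 ≤ p.length)

-- per-block scan: state = (fields, rows emitted so far in this run)
def bInner (st : List String × List (PySem.Dict String String)) (parts : List String) :
    List String × List (PySem.Dict String String) :=
  if parts.headD "" == "%F" then ((parts.drop 1).map PySem.Str.strip, st.2)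
  else if parts.headD "" == "%R" && !st.1.isEmpty then
    let vals := parts.drop 1
    let padded := (vals.take st.1.length).map PySem.Str.strip ++
                  List.replicate (st.1.length - vals.length) ""
    (st.1, st.2 ++ [PySem.Dict.ofList (st.1.zip padded)])
  else st

def bBlock (tables : PySem.Dict String (List (PySem.Dict String String)))
    (block : List (List String)) : PySem.Dict String (List (PySem.Dict String String)) :=
  let name := PySem.Str.strip ((block.headD []).getD 1 "")   -- block[0][1].strip()
  let newRows := ((block.drop 1).foldl bInner ([], [])).2
  -- rows = tables.setdefault(name, []) followed by in-place appends of this block's rows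
  (tables.setdefault name []).modify name [] (· ++ newRows)

def parse_xer_tables_py_alt (content : String) : List (String × List (List (String × String))) :=
  let lines := ((PySem.Str.splitlines content).filter (fun ln => PySem.Str.startswith ln "%")).map
      (fun ln => (PySem.Str.split? ln "\t").getD [])
  let starts := ((PySem.List.enumerate lines).filter (fun ip => bHeader ip.2)).map (·.1)
  -- blocks = [lines[s:e] for s, e in zip(starts, starts[1:] + [len(lines)])]; 0 ≤ s ≤ e here
  let blocks := (starts.zip (starts.drop 1 ++ [(lines.length : Int)])).map
      (fun se => (lines.drop se.1.toNat).take (se.2 - se.1).toNat)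
  let tables := blocks.foldl bBlock PySem.Dict.empty
  tables.items.map (fun kv => (kv.1, kv.2.map PySem.Dict.items))

-- ===== PRECONDITION & SPEC =====
def Spec_parse_xer_tables_py (content : String) (out : List (String × List (List (String × String)))) : Prop := out = parse_xer_tables_py_alt content
instance (content : String) (out : List (String × List (List (String × String)))) : Decidable (Spec_parse_xer_tables_py content out) := by unfold Spec_parse_xer_tables_py; infer_instance

-- ===== CLAIM (what is proved, stated in full; the proofs are below) =====
def Claim_equal_parse_xer_tables_py : Prop := ∀ (content : String), Dom_parse_xer_tables_py content → Spec_parse_xer_tables_py content (parse_xer_tables_py content)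

-- ===== LEMMAS AND PROOFS =====

-- ---------- 1. splitlines pieces contain no break characters; rstrip("\r\n") is the identity there ----------

theorem accPush (isB : Char → Bool) (cur : List Char) (acc : List (List Char))
    (hc : ∀ c ∈ cur, isB c = false) (ha : ∀ p ∈ acc, ∀ c ∈ p, isB c = false) :
    ∀ p ∈ cur.reverse :: acc, ∀ c ∈ p, isB c = false := by
  intro p hp c hcp
  rcases List.mem_cons.mp hp with h | h
  · exact hc c (by rw [h] at hcp; simpa using hcp)
  · exact ha p h c hcp

theorem go_no_break (isB : Char → Bool) :
    ∀ (s cur : List Char) (acc : List (List Char)),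
      (∀ c ∈ cur, isB c = false) → (∀ p ∈ acc, ∀ c ∈ p, isB c = false) →
      ∀ p ∈ PySem.Chars.splitlines.go isB s cur acc, ∀ c ∈ p, isB c = false := by
  intro s cur acc
  induction s, cur, acc using PySem.Chars.splitlines.go.induct isB with
  | case1 cur acc hcur =>
    intro hc ha
    simp only [PySem.Chars.splitlines.go, hcur, if_true]
    intro p hp
    exact ha p (by simpa using hp)
  | case2 cur acc hcur =>
    intro hc ha
    simp only [PySem.Chars.splitlines.go, if_neg hcur]
    intro p hp
    exact accPush isB cur acc hc ha p (by simp at hp ⊢; tauto)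
  | case3 rest cur acc ih =>
    intro hc ha
    simp only [PySem.Chars.splitlines.go]
    exact ih (by simp) (accPush isB cur acc hc ha)
  | case4 c rest cur acc hne hB ih =>
    intro hc ha
    have hgo : PySem.Chars.splitlines.go isB (c :: rest) cur acc
        = PySem.Chars.splitlines.go isB rest [] (cur.reverse :: acc) := by
      rw [PySem.Chars.splitlines.go.eq_3 isB cur acc c rest hne, if_pos hB]
    rw [hgo]
    exact ih (by simp) (accPush isB cur acc hc ha)
  | case5 c rest cur acc hne hB ih =>
    intro hc ha
    have hgo : PySem.Chars.splitlines.go isB (c :: rest) cur acc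
        = PySem.Chars.splitlines.go isB rest (c :: cur) acc := by
      rw [PySem.Chars.splitlines.go.eq_3 isB cur acc c rest hne, if_neg hB]
    rw [hgo]
    exact ih (by
      intro c' hc'
      rcases List.mem_cons.mp hc' with h | h
      · rw [h]; simpa using hB
      · exact hc c' h) ha

theorem splitlines_no_break :
    ∀ (s ln : String), ln ∈ PySem.Str.splitlines s →
      ∀ c ∈ ln.toList, (c == '\r' || c == '\n') = false := by
  intro s ln hln c hcln
  rw [PySem.Str.splitlines] at hln
  obtain ⟨p, hp, rfl⟩ := List.mem_map.mp hln
  rw [String.toList_ofList] at hcln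
  simp only [PySem.Chars.splitlines] at hp
  have hLc := go_no_break _ s.toList [] [] (by simp) (by simp) p hp c hcln
  simp only [Bool.or_eq_false_iff, decide_eq_false_iff_not] at hLc
  simp only [Bool.or_eq_false_iff]
  constructor
  · rw [beq_eq_false_iff_ne]
    intro h; rw [h] at hLc; simp at hLc
  · rw [beq_eq_false_iff_ne]
    intro h; rw [h] at hLc; simp at hLc

theorem rstrip_id (s ln : String) (h : ln ∈ PySem.Str.splitlines s) : pyRstripCRLF ln = ln := by
  have hnb := splitlines_no_break s ln h
  unfold pyRstripCRLF
  cases hrev : ln.toList.reverse with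
  | nil =>
    have h2 : ln.toList = [] := by simpa using congrArg List.reverse hrev
    have h3 := congrArg String.ofList h2
    rw [String.ofList_toList] at h3
    simp [h3]
  | cons c cs =>
    have hcmem : c ∈ ln.toList := by
      rw [← List.mem_reverse, hrev]; simp
    rw [List.dropWhile_cons, hnb c hcmem]
    simp only [Bool.false_eq_true, if_false]
    rw [← hrev, List.reverse_reverse, String.ofList_toList]

-- ---------- 2. A's fold = fold of aBody over the filtered, pre-split lines ----------

theorem foldl_if_filter {α β : Type} (P : α → Bool) (h : β → α → β) (l : List α) :
    ∀ (init : β),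
      l.foldl (fun s x => if P x then h s x else s) init = (l.filter P).foldl h init := by
  induction l with
  | nil => intro init; simp
  | cons x xs ih =>
    intro init
    by_cases hp : P x = true
    · simp [hp, ih]
    · simp only [Bool.not_eq_true] at hp; simp [hp, ih]


def pvLinesOf (content : String) : List (List String) :=
  ((PySem.Str.splitlines content).filter (fun ln => PySem.Str.startswith ln "%")).map
    (fun ln => (PySem.Str.split? ln "\t").getD [])

theorem reduceA (content : String) :
    (PySem.Str.splitlines content).foldl aStep (PySem.Dict.empty, none, []) =
    (pvLinesOf content).foldl aBody (PySem.Dict.empty, none, []) := by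
  have h1 : ∀ st x, x ∈ PySem.Str.splitlines content → aStep st x =
      (fun s x => if PySem.Str.startswith x "%" then aBody s ((PySem.Str.split? x "\t").getD []) else s) st x := by
    intro st x hx
    unfold aStep
    rw [rstrip_id content x hx]
    by_cases hs : PySem.Str.startswith x "%" = true
    · have hs' : PySem.Chars.startswith x.toList ['%'] = true := by simpa using hs
      have hpre : ('%' :: []) <+: x.toList := Iff.mp (PySem.Chars.startswith_iff _ _) hs'
      have hne : (x == "") = false := by
        rw [beq_eq_false_iff_ne]
        intro h
        rw [h] at hpre
        simpa using hpre.length_le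
      simp [hs', hne]
    · simp only [Bool.not_eq_true] at hs
      have hs' : PySem.Chars.startswith x.toList ['%'] = false := by simpa using hs
      simp [hs']
  rw [PySem.List.foldl_congr_mem _ _ _ _ h1, foldl_if_filter, pvLinesOf, List.foldl_map]


-- ---------- 3. the row dicts agree ----------

theorem pairs_eq (vals : List String) :
    ∀ (fields : List String) (k : Nat),
      (PySem.List.enumerate fields (k : Int)).map (fun p => (p.2, pvValAt vals p.1)) =
      fields.zip (((vals.drop k).take fields.length).map PySem.Str.strip ++
                  List.replicate (fields.length - (vals.length - k)) "") := by
  intro fields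
  induction fields with
  | nil => intro k; simp [PySem.List.enumerate]
  | cons f fs ih =>
    intro k
    have henum : PySem.List.enumerate (f :: fs) (k : Int) = ((k : Int), f) :: PySem.List.enumerate fs ((k + 1 : Nat) : Int) := by
      simp [PySem.List.enumerate]
    rw [henum]
    simp only [List.map_cons]
    by_cases hk : k < vals.length
    · have hdrop : vals.drop k = vals[k] :: vals.drop (k + 1) := List.drop_eq_getElem_cons hk
      have hval : pvValAt vals (k : Int) = PySem.Str.strip vals[k] := by
        unfold pvValAt
        rw [if_pos (by exact_mod_cast hk), PySem.List.pyGet?_natCast]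
        simp [List.getElem?_eq_getElem hk]
      have hcount : (f :: fs).length - (vals.length - k) = fs.length - (vals.length - (k + 1)) := by
        simp only [List.length_cons]; omega
      rw [hval, hdrop, hcount, ih (k + 1)]
      simp only [List.length_cons, List.take_succ_cons, List.map_cons, List.cons_append, List.zip_cons_cons]
    · have hdrop : vals.drop k = [] := List.drop_eq_nil_of_le (by omega)
      have hdrop2 : vals.drop (k + 1) = [] := List.drop_eq_nil_of_le (by omega)
      have hval : pvValAt vals (k : Int) = "" := by
        unfold pvValAt
        rw [if_neg (by omega)]
      have hcount : (f :: fs).length - (vals.length - k) = fs.length + 1 := by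
        simp only [List.length_cons]; omega
      have hcount2 : fs.length - (vals.length - (k + 1)) = fs.length := by omega
      rw [hval, hdrop, hcount, ih (k + 1), hdrop2, hcount2]
      simp [List.replicate_succ]


theorem row_eq (fields vals : List String) :
    (PySem.List.enumerate fields).foldl (fun r p => r.insert p.2 (pvValAt vals p.1)) PySem.Dict.empty =
    PySem.Dict.ofList (fields.zip ((vals.take fields.length).map PySem.Str.strip ++
                                   List.replicate (fields.length - vals.length) "")) := by
  have h0 := pairs_eq vals fields 0
  simp only [Nat.cast_zero, List.drop_zero, Nat.sub_zero] at h0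
  rw [PySem.Dict.ofList, PySem.Dict.update, ← h0, List.foldl_map]


-- ---------- 4. small Dict lemmas ----------

theorem setdefault_eq (d : PySem.Dict String (List (PySem.Dict String String))) (k : String) :
    (if d.contains k then d else d.insert k []) = d.setdefault k [] := by
  by_cases hc : d.contains k = true
  · rw [if_pos hc, PySem.Dict.setdefault_of_contains _ _ hc]
  · rw [if_neg (by simp_all), PySem.Dict.setdefault_of_not_contains _ _ (by simp_all)]


theorem modify_modify {κ ν : Type} [BEq κ] [LawfulBEq κ] (d : PySem.Dict κ ν) (k : κ) (d0 : ν)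
    (f g : ν → ν) : (d.modify k d0 f).modify k d0 g = d.modify k d0 (fun v => g (f v)) := by
  simp [PySem.Dict.modify, PySem.Dict.getD_insert_self, PySem.Dict.insert_insert_self]


theorem insert_self_of_get? {κ ν : Type} [BEq κ] [LawfulBEq κ] (d : PySem.Dict κ ν) (k : κ) (v : ν)
    (hnd : d.keys.Nodup) (h : d.get? k = some v) : d.insert k v = d := by
  have hmem : (k, v) ∈ d.items := (PySem.Dict.get?_eq_some_iff_mem_items d k v hnd).1 h
  have hc : d.contains k = true := by rw [PySem.Dict.contains_eq_isSome_get?, h]; rfl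
  apply PySem.Dict.ext
  rw [PySem.Dict.items_insert_of_contains d v hc]
  apply List.map_congr_left ?_ |>.trans (List.map_id _)
  intro p hp
  by_cases hk : (p.1 == k) = true
  · have : p = (k, v) := List.inj_on_of_nodup_map hnd hp hmem (by simpa using hk)
    simp [this]
  · simp [hk]


theorem modify_nil_of_contains {κ ν : Type} [BEq κ] [LawfulBEq κ] (d : PySem.Dict κ (List ν)) (k : κ)
    (hnd : d.keys.Nodup) (hc : d.contains k = true) : d.modify k [] (fun v => v ++ []) = d := by
  rw [PySem.Dict.contains_eq_isSome_get?] at hc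
  obtain ⟨v, hv⟩ := Option.isSome_iff_exists.1 hc
  unfold PySem.Dict.modify
  rw [PySem.Dict.getD_of_get?_eq_some _ _ hv]
  simpa using insert_self_of_get? d k v hnd hv


theorem foldl_modify_append {κ ν : Type} [BEq κ] [LawfulBEq κ] (k : κ) :
    ∀ (rs : List ν) (pre : List ν) (d : PySem.Dict κ (List ν)),
      rs.foldl (fun d r => d.modify k [] (· ++ [r])) (d.modify k [] (· ++ pre)) =
      d.modify k [] (· ++ (pre ++ rs)) := by
  intro rs
  induction rs with
  | nil => intro pre d; simp
  | cons r rs ih =>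
    intro pre d
    simp only [List.foldl_cons]
    rw [modify_modify]
    have : (fun v => (fun v => v ++ [r]) ((fun v => v ++ pre) v)) = (fun v => v ++ (pre ++ [r])) := by
      funext v; simp
    rw [this, ih (pre ++ [r]) d]
    simp


theorem foldl_modify_eq_modify {κ ν : Type} [BEq κ] [LawfulBEq κ] (k : κ)
    (rs : List ν) (d : PySem.Dict κ (List ν)) (hnd : d.keys.Nodup) (hc : d.contains k = true) :
    rs.foldl (fun d r => d.modify k [] (· ++ [r])) d = d.modify k [] (· ++ rs) := by
  cases rs with
  | nil => simpa using (modify_nil_of_contains d k hnd hc).symm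
  | cons r rs =>
    have h0 : d.modify k [] (· ++ [r]) = d.modify k [] (· ++ [r]) := rfl
    calc (r :: rs).foldl (fun d r => d.modify k [] (· ++ [r])) d
        = rs.foldl (fun d r => d.modify k [] (· ++ [r])) (d.modify k [] (· ++ [r])) := by simp
      _ = d.modify k [] (· ++ ([r] ++ rs)) := foldl_modify_append k rs [r] d
      _ = d.modify k [] (· ++ (r :: rs)) := by simp


-- ---------- 5. bInner only appends rows ----------

theorem bInner_step (f : List String) (rs : List (PySem.Dict String String)) (p : List String) :
    (bInner (f, rs) p).1 = (bInner (f, []) p).1 ∧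
    (bInner (f, rs) p).2 = rs ++ (bInner (f, []) p).2 := by
  unfold bInner
  split_ifs <;> simp


theorem bInner_rows :
    ∀ (body : List (List String)) (f : List String) (rs : List (PySem.Dict String String)),
      body.foldl bInner (f, rs) =
      ((body.foldl bInner (f, [])).1, rs ++ (body.foldl bInner (f, [])).2) := by
  intro body
  induction body with
  | nil => intro f rs; simp
  | cons p rest ih =>
    intro f rs
    simp only [List.foldl_cons]
    obtain ⟨h1, h2⟩ := bInner_step f rs p
    have hstep : bInner (f, rs) p = ((bInner (f, []) p).1, rs ++ (bInner (f, []) p).2) := by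
      rw [← h1, ← h2]
    rw [hstep, ih _ (rs ++ (bInner (f, []) p).2),
        ih (bInner (f, []) p).1 (bInner (f, []) p).2,
        show bInner (f, []) p = ((bInner (f, []) p).1, (bInner (f, []) p).2) from rfl]
    simp


-- ---------- 6. A over a block body = bInner rows appended at the block's key ----------

theorem A_inner (name : String) :
    ∀ (body : List (List String)), (∀ p ∈ body, bHeader p = false) →
      ∀ (T : PySem.Dict String (List (PySem.Dict String String))) (f : List String),
        body.foldl aBody (T, some name, f) =
        ((body.foldl bInner (f, [])).2.foldl (fun d r => d.modify name [] (· ++ [r])) T,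
         some name, (body.foldl bInner (f, [])).1) := by
  intro body
  induction body with
  | nil => intro _ T f; simp
  | cons p rest ih =>
    intro hb T f
    have hT' : ¬(p.head?.getD "" = "%T" ∧ 2 ≤ p.length) := by
      have := hb p (by simp)
      simp [bHeader] at this
      intro ⟨h1, h2⟩
      have := this h1
      omega
    have hrest : ∀ q ∈ rest, bHeader q = false := fun q hq => hb q (by simp [hq])
    simp only [List.foldl_cons]
    by_cases hF' : p.head?.getD "" = "%F"
    · have ha : aBody (T, some name, f) p = (T, some name, (p.drop 1).map PySem.Str.strip) := by
        simp [aBody, hF']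
      have hbi : bInner (f, []) p = ((p.drop 1).map PySem.Str.strip, []) := by
        simp [bInner, hF']
      rw [ha, hbi, ih hrest]
    · by_cases hR' : p.head?.getD "" = "%R"
      · by_cases hE : f = []
        · have ha : aBody (T, some name, f) p = (T, some name, f) := by
            simp [aBody, hR', hE]
          have hbi : bInner (f, []) p = (f, []) := by
            simp [bInner, hR', hE]
          rw [ha, hbi, ih hrest]
        · have hrow := row_eq f (p.drop 1)
          have ha : aBody (T, some name, f) p =
              (T.modify name [] (· ++ [PySem.Dict.ofList (f.zip
                (((p.drop 1).take f.length).map PySem.Str.strip ++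
                 List.replicate (f.length - (p.drop 1).length) ""))]), some name, f) := by
            simp only [aBody, hrow]
            simp [hR', hE]
          have hbi : bInner (f, []) p = (f, [PySem.Dict.ofList (f.zip
                (((p.drop 1).take f.length).map PySem.Str.strip ++
                 List.replicate (f.length - (p.drop 1).length) ""))]) := by
            simp [bInner, hR', hE]
          rw [ha, hbi, bInner_rows rest f _, ih hrest]
          simp
      · have ha : aBody (T, some name, f) p = (T, some name, f) := by
          simp [aBody, hT', hF', hR']
        have hbi : bInner (f, []) p = (f, []) := by
          simp [bInner, hF', hR']
        rw [ha, hbi, ih hrest]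

theorem A_block (h : List String) (body : List (List String)) (hh : bHeader h = true)
    (hb : ∀ p ∈ body, bHeader p = false)
    (T : PySem.Dict String (List (PySem.Dict String String))) (ct : Option String)
    (cf : List String) (hnd : T.keys.Nodup) :
    (h :: body).foldl aBody (T, ct, cf) =
    (bBlock T (h :: body), some (PySem.Str.strip (h.getD 1 "")), (body.foldl bInner ([], [])).1) := by
  have hT : h.head?.getD "" = "%T" ∧ 2 ≤ h.length := by
    rw [bHeader] at hh
    simp at hh
    exact hh
  have hndsd : (T.setdefault (PySem.Str.strip (h.getD 1 "")) []).keys.Nodup := by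
    by_cases hc : T.contains (PySem.Str.strip (h.getD 1 "")) = true
    · rw [PySem.Dict.setdefault_of_contains _ _ hc]; exact hnd
    · rw [PySem.Dict.setdefault_of_not_contains _ _ (by simp_all)]
      exact PySem.Dict.nodup_keys_insert _ _ _ hnd
  have hcsd : (T.setdefault (PySem.Str.strip (h.getD 1 "")) []).contains
      (PySem.Str.strip (h.getD 1 "")) = true := by
    rw [PySem.Dict.contains_setdefault]; simp
  have ha : aBody (T, ct, cf) h =
      (T.setdefault (PySem.Str.strip (h.getD 1 "")) [], some (PySem.Str.strip (h.getD 1 "")), []) := by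
    rw [← setdefault_eq]
    simp [aBody, hT.1, hT.2]
  simp only [List.foldl_cons]
  rw [ha, A_inner _ body hb _ []]
  unfold bBlock
  simp only [List.headD_cons, List.drop_succ_cons, List.drop_zero]
  rw [foldl_modify_eq_modify _ _ _ hndsd hcsd]


theorem bBlock_nodup (T : PySem.Dict String (List (PySem.Dict String String)))
    (b : List (List String)) (hnd : T.keys.Nodup) : (bBlock T b).keys.Nodup := by
  unfold bBlock
  simp only [PySem.Dict.modify]
  apply PySem.Dict.nodup_keys_insert
  by_cases hc : T.contains (PySem.Str.strip ((b.headD []).getD 1 "")) = true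
  · rw [PySem.Dict.setdefault_of_contains _ _ hc]; exact hnd
  · rw [PySem.Dict.setdefault_of_not_contains _ _ (by simp_all)]
    exact PySem.Dict.nodup_keys_insert _ _ _ hnd


-- ---------- 7. recursive segmentation and the A-side main lemma ----------

def segRec : List (List String) → List (List (List String))
  | [] => []
  | p :: l =>
    if bHeader p then (p :: l.takeWhile (fun q => !bHeader q)) :: segRec (l.dropWhile (fun q => !bHeader q))
    else segRec l
termination_by l => l.length
decreasing_by
  · simp only [List.length_cons]; exact Nat.lt_succ_of_le (List.length_dropWhile_le _ _)
  · simp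

theorem dropWhile_head_header :
    ∀ (l : List (List String)) (q : List String) (qs : List (List String)),
      l.dropWhile (fun x => !bHeader x) = q :: qs → bHeader q = true := by
  intro l
  induction l with
  | nil => intro q qs h; simp at h
  | cons a l ih =>
    intro q qs h
    by_cases ha : bHeader a = true
    · rw [List.dropWhile_cons, ha] at h
      simp at h
      rw [← h.1]; exact ha
    · simp only [Bool.not_eq_true] at ha
      rw [List.dropWhile_cons, ha] at h
      exact ih q qs (by simpa using h)

theorem mainA'' :
    ∀ (n : Nat) (l : List (List String)), l.length ≤ n →
      ∀ (T : PySem.Dict String (List (PySem.Dict String String))) (ct : Option String)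
        (cf : List String), T.keys.Nodup →
      (l = [] ∨ ∃ p r, l = p :: r ∧ bHeader p = true) →
      (l.foldl aBody (T, ct, cf)).1 = (segRec l).foldl bBlock T := by
  intro n
  induction n with
  | zero =>
    intro l hl T ct cf hnd hshape
    have : l = [] := List.eq_nil_of_length_eq_zero (by omega)
    subst this
    rw [show segRec [] = [] from by rw [segRec]]
    simp
  | succ n ih =>
    intro l hl T ct cf hnd hshape
    rcases hshape with rfl | ⟨p, r, rfl, hp⟩
    · rw [show segRec [] = [] from by rw [segRec]]
      simp
    · have htw : ∀ q ∈ r.takeWhile (fun q => !bHeader q), bHeader q = false := by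
        intro q hq
        simpa using List.mem_takeWhile_imp hq
      have hseg : segRec (p :: r) =
          (p :: r.takeWhile (fun q => !bHeader q)) :: segRec (r.dropWhile (fun q => !bHeader q)) := by
        rw [segRec, if_pos hp]
      conv_lhs => rw [show p :: r = (p :: r.takeWhile (fun q => !bHeader q)) ++ r.dropWhile (fun q => !bHeader q) by
        rw [List.cons_append, List.takeWhile_append_dropWhile]]
      rw [List.foldl_append, A_block p _ hp htw T ct cf hnd, hseg]
      simp only [List.foldl_cons]
      apply ih _ ?hlen _ _ _ (bBlock_nodup T _ hnd)
      · cases hdw : r.dropWhile (fun q => !bHeader q) with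
        | nil => left; rfl
        | cons q qs => right; exact ⟨q, qs, rfl, dropWhile_head_header r q qs hdw⟩
      · have h := List.length_dropWhile_le (fun q => !bHeader q) r
        simp only [List.length_cons] at hl
        omega

theorem mainA' (l : List (List String)) (T : PySem.Dict String (List (PySem.Dict String String)))
    (ct : Option String) (cf : List String) (hnd : T.keys.Nodup)
    (hshape : l = [] ∨ ∃ p r, l = p :: r ∧ bHeader p = true) :
    (l.foldl aBody (T, ct, cf)).1 = (segRec l).foldl bBlock T :=
  mainA'' l.length l le_rfl T ct cf hnd hshape

theorem mainA :
    ∀ (l : List (List String)) (T : PySem.Dict String (List (PySem.Dict String String))),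
      T.keys.Nodup → (l.foldl aBody (T, none, [])).1 = (segRec l).foldl bBlock T := by
  intro l
  induction l with
  | nil => intro T hnd; simp [segRec]
  | cons p r ih =>
    intro T hnd
    by_cases hp : bHeader p = true
    · exact mainA' (p :: r) T none [] hnd (Or.inr ⟨p, r, rfl, hp⟩)
    · simp only [Bool.not_eq_true] at hp
      have hT' : ¬(p.head?.getD "" = "%T" ∧ 2 ≤ p.length) := by
        rw [bHeader] at hp
        simp at hp
        intro ⟨h1, h2⟩
        have := hp h1
        omega
      have ha : aBody (T, none, []) p = (T, none, []) := by
        simp [aBody, hT']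
      have hseg : segRec (p :: r) = segRec r := by
        rw [segRec, if_neg (by simp [hp])]
      rw [List.foldl_cons, ha, hseg]
      exact ih T hnd


-- ---------- 8. B's start-index segmentation = segRec ----------

def natStarts : List (List String) → List Nat
  | [] => []
  | p :: l => if bHeader p then 0 :: (natStarts l).map (· + 1) else (natStarts l).map (· + 1)

def natBlocks (l : List (List String)) : List (List (List String)) :=
  ((natStarts l).zip ((natStarts l).drop 1 ++ [l.length])).map
    (fun se => (l.drop se.1).take (se.2 - se.1))

theorem enumerate_starts (l : List (List String)) :
    ∀ (k : Int),
      ((PySem.List.enumerate l k).filter (fun ip => bHeader ip.2)).map (·.1) =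
      (natStarts l).map (fun (n : Nat) => (n : Int) + k) := by
  induction l with
  | nil => intro k; simp [PySem.List.enumerate, natStarts]
  | cons p l ih =>
    intro k
    have henum : PySem.List.enumerate (p :: l) k = (k, p) :: PySem.List.enumerate l (k + 1) := by
      simp [PySem.List.enumerate]
    rw [henum]
    by_cases hp : bHeader p = true
    · rw [natStarts, if_pos hp]
      simp only [List.filter_cons, hp, if_true, List.map_cons, List.map_map, ih (k + 1)]
      congr 1
      · simp
      · apply List.map_congr_left
        intro n _
        simp
        ring
    · simp only [Bool.not_eq_true] at hp
      rw [natStarts, if_neg (by simp [hp])]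
      simp only [List.filter_cons, hp, Bool.false_eq_true, if_false, List.map_map, ih (k + 1)]
      apply List.map_congr_left
      intro n _
      simp
      ring

theorem portBlocks_eq_natBlocks (l : List (List String)) :
    (((((PySem.List.enumerate l).filter (fun ip => bHeader ip.2)).map (·.1)).zip
        ((((PySem.List.enumerate l).filter (fun ip => bHeader ip.2)).map (·.1)).drop 1 ++ [(l.length : Int)])).map
      (fun se => (l.drop se.1.toNat).take (se.2 - se.1).toNat)) = natBlocks l := by
  have hs := enumerate_starts l 0
  simp only [Int.add_zero] at hs
  rw [hs]
  have hzip : ((natStarts l).map (fun (n : Nat) => (n : Int))).drop 1 ++ [(l.length : Int)] =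
      ((natStarts l).drop 1 ++ [l.length]).map (fun (n : Nat) => (n : Int)) := by
    rw [List.map_append, List.map_drop]
    simp
  rw [hzip, List.zip_map, List.map_map]
  unfold natBlocks
  apply List.map_congr_left
  intro se _
  simp only [Function.comp, Prod.map, Int.toNat_natCast]
  congr 1
  omega

theorem natStarts_nil_iff (l : List (List String)) :
    natStarts l = [] ↔ ∀ p ∈ l, bHeader p = false := by
  induction l with
  | nil => simp [natStarts]
  | cons p l ih =>
    rw [natStarts]
    by_cases hp : bHeader p = true
    · simp [hp]
    · simp only [Bool.not_eq_true] at hp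
      simp [hp, ih]


theorem natStarts_head :
    ∀ (l : List (List String)) (s0 : Nat) (s' : List Nat),
      natStarts l = s0 :: s' → l.take s0 = l.takeWhile (fun q => !bHeader q) := by
  intro l
  induction l with
  | nil => intro s0 s' h; simp [natStarts] at h
  | cons p l ih =>
    intro s0 s' h
    rw [natStarts] at h
    by_cases hp : bHeader p = true
    · rw [if_pos hp] at h
      injection h with h0 h1
      rw [← h0]
      simp [hp]
    · simp only [Bool.not_eq_true] at hp
      rw [if_neg (by simp [hp])] at h
      cases hns : natStarts l with
      | nil => rw [hns] at h; simp at h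
      | cons n0 ns' =>
        rw [hns] at h
        simp only [List.map_cons] at h
        injection h with h0 h1
        rw [← h0, List.take_succ_cons, List.takeWhile_cons, show (!bHeader p) = true from by simp [hp],
            if_pos rfl, ih n0 ns' hns]

theorem segRec_skip :
    ∀ (pre rest : List (List String)), (∀ p ∈ pre, bHeader p = false) →
      segRec (pre ++ rest) = segRec rest := by
  intro pre
  induction pre with
  | nil => intro rest _; simp
  | cons a pre ih =>
    intro rest hpre
    have ha : bHeader a = false := hpre a (by simp)
    rw [List.cons_append, segRec, if_neg (by simp [ha])]
    exact ih rest (fun p hp => hpre p (by simp [hp]))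


theorem shift_blocks (p : List String) (l : List (List String)) (ns : List Nat) :
    ((ns.map (· + 1)).zip ((ns.map (· + 1)).drop 1 ++ [l.length + 1])).map
      (fun se => ((p :: l).drop se.1).take (se.2 - se.1)) =
    (ns.zip (ns.drop 1 ++ [l.length])).map (fun se => (l.drop se.1).take (se.2 - se.1)) := by
  rw [← List.map_drop,
      show (ns.drop 1).map (· + 1) ++ [l.length + 1] = (ns.drop 1 ++ [l.length]).map (· + 1) from by
        rw [List.map_append]; rfl,
      List.zip_map, List.map_map]
  apply List.map_congr_left
  intro se _
  simp [Prod.map, List.drop_succ_cons, Nat.succ_sub_succ]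

theorem segRec_dropWhile (l : List (List String)) :
    segRec l = segRec (l.dropWhile (fun q => !bHeader q)) := by
  conv_lhs => rw [← List.takeWhile_append_dropWhile (p := fun q => !bHeader q) (l := l)]
  exact segRec_skip _ _ (fun q hq => by simpa using List.mem_takeWhile_imp hq)

theorem natBlocks_eq_segRec : ∀ (l : List (List String)), natBlocks l = segRec l := by
  intro l
  induction l with
  | nil => rw [show segRec [] = [] from by rw [segRec]]; simp [natBlocks, natStarts]
  | cons p l ih =>
    by_cases hp : bHeader p = true
    · rw [show segRec (p :: l) =
          (p :: l.takeWhile (fun q => !bHeader q)) :: segRec (l.dropWhile (fun q => !bHeader q)) from by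
        rw [segRec, if_pos hp]]
      unfold natBlocks
      rw [natStarts, if_pos hp]
      cases hns : natStarts l with
      | nil =>
        have hnone : ∀ q ∈ l, bHeader q = false := (natStarts_nil_iff l).1 hns
        have htw : l.takeWhile (fun q => !bHeader q) = l :=
          List.takeWhile_eq_self_iff.2 (by intro x hx; simp [hnone x hx])
        have hdw : l.dropWhile (fun q => !bHeader q) = [] :=
          List.dropWhile_eq_nil_iff.2 (by intro x hx; simp [hnone x hx])
        rw [htw, hdw, show segRec [] = [] from by rw [segRec]]
        simp [List.take_of_length_le]
      | cons s0 s' =>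
        have htake := natStarts_head l s0 s' hns
        rw [List.length_cons]
        have hzip : ((0 : Nat) :: (s0 :: s').map (· + 1)).zip
              (((0 : Nat) :: (s0 :: s').map (· + 1)).drop 1 ++ [l.length + 1])
            = ((0 : Nat), s0 + 1) ::
              ((s0 :: s').map (· + 1)).zip (((s0 :: s').map (· + 1)).drop 1 ++ [l.length + 1]) := by
          simp
        rw [hzip, List.map_cons, shift_blocks p l (s0 :: s')]
        have hblock : ((p :: l).drop (0 : Nat)).take (s0 + 1 - 0) = p :: l.takeWhile (fun q => !bHeader q) := by
          simp only [List.drop_zero, Nat.sub_zero, List.take_succ_cons, htake]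
        rw [hblock]
        congr 1
        rw [show ((s0 :: s').zip ((s0 :: s').drop 1 ++ [l.length])).map
              (fun se => (l.drop se.1).take (se.2 - se.1)) = natBlocks l from by rw [natBlocks, hns], ih]
        exact segRec_dropWhile l
    · simp only [Bool.not_eq_true] at hp
      rw [show segRec (p :: l) = segRec l from by rw [segRec, if_neg (by simp [hp])]]
      unfold natBlocks
      rw [natStarts, if_neg (by simp [hp]), List.length_cons, shift_blocks]
      exact ih

-- ===== VERDICT (by name: the statement is the Claim_ definition above) =====

-- ===== VERDICT (by name: the statement is the Claim_ definition above) =====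
theorem parse_xer_tables_py_spec : Claim_equal_parse_xer_tables_py := by
  intro content _
  unfold Spec_parse_xer_tables_py
  simp only [parse_xer_tables_py, parse_xer_tables_py_alt]
  rw [reduceA content, mainA (pvLinesOf content) PySem.Dict.empty (by simp),
      portBlocks_eq_natBlocks, natBlocks_eq_segRec]
  simp only [pvLinesOf]
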